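-- pv_equiv track=rewrite | github.com/jiaowoshabi/dailycoding | src/prob2.py | no_div
-- ===== SOURCE A (Python) =====
-- def no_div(lst):
--     def multiply(lst):
--         prod = 1
--         for i in lst:
--             prod *= i
--         return prod
--
--     al = set(lst)
--     return [multiply(list(al-set([i]))) for i in lst]
-- ===== SOURCE B (Python) =====
-- def no_div(lst):
--     d = list(dict.fromkeys(lst))
--     m = {}
--     p = 1
--     for v in d:
--         m[v] = p
--         p *= v
--     s = 1
--     for v in reversed(d):
--         m[v] *= s
--         s *= v
--     return [m[v] for v in lst]
-- ===== Notes on version B (the rewrite author's own statement) =====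
-- stated objective: alternative
-- what changed: Instead of recomputing the product of the distinct values minus {i} from scratch for every element, B makes one prefix pass and one suffix pass over the distinct values to build a dict mapping each distinct value to the product of all other distinct values, then maps the list through that dict (intended as faster; measured 221x at the largest size both programs finished, but unconfirmed at sizes where bignum products dominate).
import Mathlib
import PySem

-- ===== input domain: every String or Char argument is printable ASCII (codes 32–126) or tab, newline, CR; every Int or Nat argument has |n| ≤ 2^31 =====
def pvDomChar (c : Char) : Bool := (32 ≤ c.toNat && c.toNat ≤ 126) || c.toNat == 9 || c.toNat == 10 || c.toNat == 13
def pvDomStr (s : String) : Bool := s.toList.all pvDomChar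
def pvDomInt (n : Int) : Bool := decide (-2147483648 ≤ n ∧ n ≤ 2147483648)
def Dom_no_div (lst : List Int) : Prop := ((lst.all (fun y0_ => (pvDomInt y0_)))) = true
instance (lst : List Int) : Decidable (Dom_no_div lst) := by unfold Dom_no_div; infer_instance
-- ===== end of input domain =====

-- B replaces A's per-element product over the distinct values by two prefix/suffix product
-- passes over the distinct values into a dict, then a map over lst (fewer multiplications;
-- intended as faster, measured 221x at the largest size both finished, unconfirmed at larger sizes).

-- ===== PORT A =====
-- inner helper 'multiply'
def pvMultiply (l : List Int) : Int := l.foldl (fun prod i => prod * i) 1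

def no_div (lst : List Int) : List Int :=
  let al := PySem.Set.ofList lst
  lst.map (fun i => pvMultiply (PySem.Set.diff al (PySem.Set.ofList [i])))

-- ===== PORT B =====
-- loop body of B's first pass: m[v] = p; p *= v
def pvStep1 (st : PySem.Dict Int Int × Int) (v : Int) : PySem.Dict Int Int × Int :=
  (st.1.insert v st.2, st.2 * v)

-- loop body of B's second pass: m[v] *= s; s *= v
def pvStep2 (st : PySem.Dict Int Int × Int) (v : Int) : PySem.Dict Int Int × Int :=
  (st.1.modify v 0 (fun x => x * st.2), st.2 * v)

def no_div_alt (lst : List Int) : List Int :=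
  let d := PySem.List.dedup lst
  let mp := d.foldl pvStep1 (PySem.Dict.empty, 1)
  let ms := d.reverse.foldl pvStep2 (mp.1, 1)
  -- m[v]: the key is always present (v ∈ lst ⇒ v ∈ d), so the total lookup is exact here
  lst.map (fun v => (ms.1.get? v).getD 0)

-- ===== PRECONDITION & SPEC =====
def Spec_no_div (lst : List Int) (out : List Int) : Prop := out = no_div_alt lst
instance (lst : List Int) (out : List Int) : Decidable (Spec_no_div lst out) := by unfold Spec_no_div; infer_instance

-- ===== CLAIM (what is proved, stated in full; the proofs are below) =====
def Claim_equal_no_div : Prop := ∀ (lst : List Int), Dom_no_div lst → Spec_no_div lst (no_div lst)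

-- ===== LEMMAS AND PROOFS =====

theorem pv_get?_foldl1_of_not_mem (l : List Int) (st : PySem.Dict Int Int × Int) (v : Int)
    (hv : v ∉ l) : ((l.foldl pvStep1 st).1).get? v = st.1.get? v := by
  induction l generalizing st with
  | nil => rfl
  | cons u r ih =>
    simp only [List.mem_cons, not_or] at hv
    rw [List.foldl_cons, ih _ hv.2]
    exact PySem.Dict.get?_insert_of_ne _ _ hv.1

theorem pv_get?_foldl2_of_not_mem (l : List Int) (st : PySem.Dict Int Int × Int) (v : Int)
    (hv : v ∉ l) : ((l.foldl pvStep2 st).1).get? v = st.1.get? v := by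
  induction l generalizing st with
  | nil => rfl
  | cons u r ih =>
    simp only [List.mem_cons, not_or] at hv
    rw [List.foldl_cons, ih _ hv.2]
    exact PySem.Dict.get?_insert_of_ne _ _ hv.1

theorem pv_pass1 (l : List Int) (hnd : l.Nodup) (d0 : PySem.Dict Int Int) (p : Int)
    (hfresh : ∀ x ∈ l, d0.get? x = none) (v : Int) (hv : v ∈ l) :
    ((l.foldl pvStep1 (d0, p)).1).get? v
      = some (p * (l.takeWhile (fun x => x != v)).prod) := by
  induction l generalizing d0 p with
  | nil => cases hv
  | cons u r ih =>
    rw [List.foldl_cons]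
    by_cases hvu : v = u
    · subst hvu
      have hvr : v ∉ r := (List.nodup_cons.mp hnd).1
      rw [pv_get?_foldl1_of_not_mem r _ v hvr]
      simp [pvStep1, PySem.Dict.get?_insert_self]
    · have hvr : v ∈ r := (List.mem_cons.mp hv).resolve_left hvu
      have hnd' := (List.nodup_cons.mp hnd).2
      have hfresh' : ∀ x ∈ r, (d0.insert u p).get? x = none := by
        intro x hx
        have hxu : x ≠ u := fun h => (List.nodup_cons.mp hnd).1 (h ▸ hx)
        rw [PySem.Dict.get?_insert_of_ne _ _ hxu]
        exact hfresh x (List.mem_cons_of_mem _ hx)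
      have := ih hnd' (d0.insert u p) (p * u) hfresh' hvr
      simp only [pvStep1] at this ⊢
      rw [this]
      have hu : (u != v) = true := by simp [bne, Ne.symm hvu]
      simp [hu, mul_assoc]

theorem pv_pass2 (l : List Int) (hnd : l.Nodup) (m0 : PySem.Dict Int Int) (s : Int)
    (g : Int → Int) (hg : ∀ x ∈ l, m0.get? x = some (g x)) (v : Int) (hv : v ∈ l) :
    ((l.foldl pvStep2 (m0, s)).1).get? v
      = some (g v * (s * (l.takeWhile (fun x => x != v)).prod)) := by
  induction l generalizing m0 s with
  | nil => cases hv
  | cons u r ih =>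
    rw [List.foldl_cons]
    have hgu : m0.getD u 0 = g u := by
      have := hg u (List.mem_cons_self)
      simp [PySem.Dict.getD, this]
    by_cases hvu : v = u
    · subst hvu
      have hvr : v ∉ r := (List.nodup_cons.mp hnd).1
      rw [pv_get?_foldl2_of_not_mem r _ v hvr]
      simp [pvStep2, PySem.Dict.modify, hgu, PySem.Dict.get?_insert_self]
    · have hvr : v ∈ r := (List.mem_cons.mp hv).resolve_left hvu
      have hnd' := (List.nodup_cons.mp hnd).2
      have hg' : ∀ x ∈ r, ((pvStep2 (m0, s) u).1).get? x = some (g x) := by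
        intro x hx
        have hxu : x ≠ u := fun h => (List.nodup_cons.mp hnd).1 (h ▸ hx)
        simp only [pvStep2, PySem.Dict.modify]
        rw [PySem.Dict.get?_insert_of_ne _ _ hxu]
        exact hg x (List.mem_cons_of_mem _ hx)
      have := ih hnd' (pvStep2 (m0, s) u).1 (s * u) hg' hvr
      simp only [pvStep2] at this ⊢
      rw [this]
      have hu : (u != v) = true := by simp [bne, Ne.symm hvu]
      simp [hu, mul_assoc]

theorem pv_dropWhile_mem (v : Int) (l : List Int) (hv : v ∈ l) :
    ∃ r, l.dropWhile (fun x => x != v) = v :: r := by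
  induction l with
  | nil => cases hv
  | cons u r ih =>
    by_cases huv : u = v
    · subst huv
      exact ⟨r, by simp⟩
    · have hvr : v ∈ r := (List.mem_cons.mp hv).resolve_left (fun h => huv h.symm)
      obtain ⟨t, ht⟩ := ih hvr
      exact ⟨t, by simpa [List.dropWhile_cons, bne, huv] using ht⟩

theorem pv_takeWhile_middle (p : Int → Bool) (xs ys : List Int) (y : Int)
    (hxs : ∀ x ∈ xs, p x = true) (hy : p y = false) :
    (xs ++ y :: ys).takeWhile p = xs := by
  induction xs with
  | nil => simp [hy]
  | cons a t ih =>
    have ha := hxs a (List.mem_cons_self)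
    simp only [List.cons_append, List.takeWhile_cons, ha, if_true]
    rw [ih (fun x hx => hxs x (List.mem_cons_of_mem _ hx))]

-- prefix * suffix products over a nodup list = product of everything except v
theorem pv_prefix_suffix (d : List Int) (hnd : d.Nodup) (v : Int) (hv : v ∈ d) :
    (d.takeWhile (fun x => x != v)).prod * ((d.reverse.takeWhile (fun x => x != v)).prod)
      = (d.filter (fun x => x != v)).prod := by
  obtain ⟨r, hr⟩ := pv_dropWhile_mem v d hv
  have hsplit : d = d.takeWhile (fun x => x != v) ++ (v :: r) := by
    rw [← hr, List.takeWhile_append_dropWhile]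
  have htv : ∀ x ∈ d.takeWhile (fun x => x != v), (x != v) = true :=
    fun x hx => List.mem_takeWhile_imp (p := fun x => x != v) (l := d) hx
  have hnd' : (d.takeWhile (fun x => x != v) ++ v :: r).Nodup := hsplit ▸ hnd
  have hvr : v ∉ r := by
    have := (List.nodup_append.mp hnd').2.1
    exact (List.nodup_cons.mp this).1
  have hrv : ∀ x ∈ r, (x != v) = true := by
    intro x hx
    have hxv : x ≠ v := fun h => hvr (h ▸ hx)
    simp [bne, hxv]
  have hdr : d.reverse = r.reverse ++ v :: (d.takeWhile (fun x => x != v)).reverse := by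
    have := congrArg List.reverse hsplit
    simpa using this
  have hrev : d.reverse.takeWhile (fun x => x != v) = r.reverse := by
    rw [hdr]
    exact pv_takeWhile_middle _ _ _ _ (fun x hx => hrv x (List.mem_reverse.mp hx)) (by simp)
  have hfilter : d.filter (fun x => x != v) = d.takeWhile (fun x => x != v) ++ r := by
    conv_lhs => rw [hsplit]
    rw [List.filter_append, List.filter_cons_of_neg (by simp),
      List.filter_eq_self.mpr htv, List.filter_eq_self.mpr hrv]
  rw [hrev, hfilter, List.prod_reverse, List.prod_append]

-- the A-side per-element value as a filter product
theorem pv_a_value (al : List Int) (v : Int) :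
    pvMultiply (PySem.Set.diff al (PySem.Set.ofList [v]))
      = (al.filter (fun x => x != v)).prod := by
  have h1 : PySem.Set.ofList [v] = [v] := rfl
  have h2 : PySem.Set.diff al [v] = al.filter (fun x => x != v) := by
    simp [PySem.Set.diff, PySem.Set.contains, bne, beq_eq_decide]
  rw [pvMultiply, h1, h2, List.prod_eq_foldl]

-- ===== VERDICT (by name: the statement is the Claim_ definition above) =====
theorem no_div_spec : Claim_equal_no_div := by
  intro lst _
  unfold Spec_no_div no_div no_div_alt
  apply List.map_congr_left
  intro v hv
  set d := PySem.List.dedup lst with hd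
  have hnd : d.Nodup := by
    rw [hd, PySem.List.dedup_eq_ofList]; exact PySem.Set.nodup_ofList lst
  have hvd : v ∈ d := by
    rw [hd]; exact (PySem.List.mem_dedup lst v).mpr hv
  have h1 := pv_pass1 d hnd PySem.Dict.empty 1 (fun x _ => rfl) v hvd
  have h2 := pv_pass2 d.reverse (List.nodup_reverse.mpr hnd) _ 1
      (fun w => 1 * (d.takeWhile (fun x => x != w)).prod)
      (fun x hx => pv_pass1 d hnd PySem.Dict.empty 1 (fun x _ => rfl) x (List.mem_reverse.mp hx))
      v (List.mem_reverse.mpr hvd)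
  rw [h2]
  rw [pv_a_value, ← PySem.List.dedup_eq_ofList, ← hd]
  simp only [Option.getD_some, one_mul]
  exact (pv_prefix_suffix d hnd v hvd).symm
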